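-- pv_equiv track=rewrite | github.com/lukasmonk/lucaschessR2 | bin/Code/Engines/EngineResponse.py | check_claves
-- ===== SOURCE A (Python) =====
-- def check_claves(mensaje, st_claves):
--     d_claves = {}
--     key = ""
--     dato = ""
--     for palabra in mensaje.split(" "):
--         if palabra in st_claves:
--             if key:
--                 d_claves[key] = dato.strip()
--             key = palabra
--             dato = ""
--         else:
--             dato += " " + palabra
--     if key:
--         d_claves[key] = dato.strip()
--     return d_claves
-- ===== SOURCE B (Python) =====
-- def check_claves(mensaje, st_claves):
--     keys = set(st_claves)
--     words = mensaje.split(" ")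
--     d_claves = {}
--     # discard the words before the first key
--     while words and words[0] not in keys:
--         words = words[1:]
--     # now words is empty or starts with a key: peel off one (key, segment) block at a time
--     while words:
--         k, rest = words[0], words[1:]
--         seg = []
--         while rest and rest[0] not in keys:
--             seg.append(rest[0])
--             rest = rest[1:]
--         d_claves[k] = " ".join(seg).strip()
--         words = rest
--     return d_claves
-- ===== Notes on version B (the rewrite author's own statement) =====
-- stated objective: alternative
-- what changed: Replaces the single accumulator loop with running key/dato strings by a span decomposition: skip the pre-key prefix, then repeatedly peel off one key and its following non-key segment and join that segment once.
-- outside the precondition, e.g. on check_claves('a  b', {'a', ''}): A returns {'a': ''}, B returns {'a': '', '': 'b'}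
import Mathlib
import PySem

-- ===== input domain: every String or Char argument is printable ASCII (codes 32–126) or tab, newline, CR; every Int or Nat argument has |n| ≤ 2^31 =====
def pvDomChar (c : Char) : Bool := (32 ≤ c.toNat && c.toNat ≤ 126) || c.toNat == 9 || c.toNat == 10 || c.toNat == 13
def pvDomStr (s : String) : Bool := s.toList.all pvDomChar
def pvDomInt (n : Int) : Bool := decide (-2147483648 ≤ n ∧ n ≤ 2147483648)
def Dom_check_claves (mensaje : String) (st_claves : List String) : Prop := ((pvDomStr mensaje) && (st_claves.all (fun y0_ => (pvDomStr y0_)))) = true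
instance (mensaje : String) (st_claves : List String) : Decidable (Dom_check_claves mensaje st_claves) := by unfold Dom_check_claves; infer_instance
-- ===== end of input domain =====

-- B replaces A's single accumulator loop (running key/dato strings) by a span decomposition
-- (skip the pre-key prefix, then peel off one key + following segment at a time and join it once);
-- objective: alternative.


-- ===== PORT A =====
-- the for-loop of A over the words, state (d_claves, key, dato); the trailing 'if key:' insert is the [] case
def pyLoopA (st_claves : List String) :
    List String → PySem.Dict String String → String → String → PySem.Dict String String
  | [], d_claves, key, dato =>
      if key ≠ "" then d_claves.insert key (PySem.Str.strip dato) else d_claves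
  | palabra :: rest, d_claves, key, dato =>
      if st_claves.contains palabra then
        pyLoopA st_claves rest
          (if key ≠ "" then d_claves.insert key (PySem.Str.strip dato) else d_claves) palabra ""
      else
        pyLoopA st_claves rest d_claves key (dato ++ " " ++ palabra)

def check_claves (mensaje : String) (st_claves : List String) : List (String × String) :=
  (pyLoopA st_claves ((PySem.Str.split? mensaje " ").getD []) PySem.Dict.empty "" "").items

-- ===== PORT B =====
-- B's first while loop: drop the words before the first key
def altSkip (keys : PySem.Set String) : List String → List String
  | [] => []
  | w :: ws => if keys.contains w then w :: ws else altSkip keys ws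

-- B's inner while loop: (seg, rest) — seg accumulates the non-key words, rest starts at the next key
def altSeg (keys : PySem.Set String) : List String → List String → List String × List String
  | seg, [] => (seg, [])
  | seg, w :: ws => if keys.contains w then (seg, w :: ws) else altSeg keys (seg ++ [w]) ws

theorem altSeg_rest_len (keys : PySem.Set String) :
    ∀ (ws seg : List String), (altSeg keys seg ws).2.length ≤ ws.length := by
  intro ws
  induction ws with
  | nil => intro seg; simp [altSeg]
  | cons w ws ih =>
      intro seg
      by_cases h : w ∈ keys <;> simp [altSeg, h]
      exact Nat.le_succ_of_le (ih _)

-- B's outer while loop: words starts with a key (or is empty); peel one (key, segment) block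
def altBlocks (keys : PySem.Set String) :
    List String → PySem.Dict String String → PySem.Dict String String
  | [], d_claves => d_claves
  | k :: rest, d_claves =>
      let p := altSeg keys [] rest
      altBlocks keys p.2 (d_claves.insert k (PySem.Str.strip (PySem.Str.join " " p.1)))
  termination_by ws _ => ws.length
  decreasing_by
    exact Nat.lt_succ_of_le (altSeg_rest_len keys rest [])

def check_claves_alt (mensaje : String) (st_claves : List String) : List (String × String) :=
  let keys := PySem.Set.ofList st_claves
  (altBlocks keys (altSkip keys ((PySem.Str.split? mensaje " ").getD [])) PySem.Dict.empty).items

-- ===== PRECONDITION & SPEC =====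
-- Pre_ excludes only the corner where "" is a key AND the split message actually contains an empty
-- word (empty message, consecutive/leading/trailing spaces): there A's 'if key:' truthiness test
-- accidentally discards the empty key and the words after it — a corner neither behaviour was
-- specified for; everywhere else both keys and message are unrestricted.
def Pre_check_claves (mensaje : String) (st_claves : List String) : Prop :=
  ¬ ("" ∈ st_claves ∧ "" ∈ (PySem.Str.split? mensaje " ").getD [])
instance (mensaje : String) (st_claves : List String) : Decidable (Pre_check_claves mensaje st_claves) := by
  unfold Pre_check_claves; infer_instance

def pvWitness_check_claves : String × List String := ("x a 1 2 b 3 a 4", ["a", "b"])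

def Spec_check_claves (mensaje : String) (st_claves : List String) (out : List (String × String)) : Prop := out = check_claves_alt mensaje st_claves
instance (mensaje : String) (st_claves : List String) (out : List (String × String)) : Decidable (Spec_check_claves mensaje st_claves out) := by unfold Spec_check_claves; infer_instance

-- ===== CLAIM (what is proved, stated in full; the proofs are below) =====
def Claim_equal_check_claves : Prop := ∀ (mensaje : String) (st_claves : List String), Dom_check_claves mensaje st_claves → Pre_check_claves mensaje st_claves → Spec_check_claves mensaje st_claves (check_claves mensaje st_claves)

-- ===== LEMMAS AND PROOFS =====

-- unfolding equations for the loops, with the Bool membership test rewritten to ∈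
theorem pyLoopA_cons (st_claves : List String) (w : String) (ws : List String)
    (d : PySem.Dict String String) (key dato : String) :
    pyLoopA st_claves (w :: ws) d key dato =
      if w ∈ st_claves then
        pyLoopA st_claves ws
          (if key ≠ "" then d.insert key (PySem.Str.strip dato) else d) w ""
      else pyLoopA st_claves ws d key (dato ++ " " ++ w) := by
  simp [pyLoopA]

theorem altSeg_cons (keys : PySem.Set String) (seg : List String) (w : String) (ws : List String) :
    altSeg keys seg (w :: ws) =
      if w ∈ keys then (seg, w :: ws) else altSeg keys (seg ++ [w]) ws := by
  simp [altSeg]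

theorem altSkip_cons (keys : PySem.Set String) (w : String) (ws : List String) :
    altSkip keys (w :: ws) = if w ∈ keys then w :: ws else altSkip keys ws := by
  simp [altSkip]

theorem altBlocks_cons (keys : PySem.Set String) (k : String) (rest : List String)
    (d : PySem.Dict String String) :
    altBlocks keys (k :: rest) d =
      altBlocks keys (altSeg keys [] rest).2
        (d.insert k (PySem.Str.strip (PySem.Str.join " " (altSeg keys [] rest).1))) := by
  rw [altBlocks]

-- A's dato accumulation over a list of words
def acc (dato : String) (seg : List String) : String :=
  seg.foldl (fun a w => a ++ " " ++ w) dato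

theorem acc_shift (seg : List String) : ∀ (x : String), acc x seg = x ++ acc "" seg := by
  induction seg with
  | nil => intro x; simp [acc]
  | cons w s ih =>
      intro x
      show acc (x ++ " " ++ w) s = x ++ acc ("" ++ " " ++ w) s
      rw [ih (x ++ " " ++ w), ih ("" ++ " " ++ w), String.empty_append]
      simp [String.append_assoc]

theorem strip_space (s : String) : PySem.Str.strip (" " ++ s) = PySem.Str.strip s := by
  apply String.toList_inj.mp
  simp [PySem.Str.toList_strip, PySem.Chars.strip, PySem.Chars.lstrip]
  simp [PySem.Chars.isspace]

theorem acc_eq_space_join (w : String) (s : List String) :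
    acc "" (w :: s) = " " ++ PySem.Str.join " " (w :: s) := by
  induction s generalizing w with
  | nil =>
      apply String.toList_inj.mp
      simp [acc, PySem.Str.toList_join, PySem.Chars.join_singleton]
  | cons v t ih =>
      have h1 : acc "" (w :: v :: t) = ("" ++ " " ++ w) ++ acc "" (v :: t) := by
        show acc ("" ++ " " ++ w) (v :: t) = _
        exact acc_shift (v :: t) _
      rw [h1, ih v]
      apply String.toList_inj.mp
      simp [PySem.Str.toList_join, PySem.Chars.join_cons_cons]

theorem strip_acc_eq_strip_join (seg : List String) :
    PySem.Str.strip (acc "" seg) = PySem.Str.strip (PySem.Str.join " " seg) := by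
  cases seg with
  | nil => rfl
  | cons w s => rw [acc_eq_space_join, strip_space]

theorem ne_empty_of_mem (st_claves ws : List String) (w : String)
    (h0 : "" ∈ st_claves → "" ∉ w :: ws) (h : w ∈ st_claves) : w ≠ "" := by
  intro he; subst he; exact h0 h List.mem_cons_self

theorem altSeg_shift (keys : PySem.Set String) :
    ∀ (ws seg : List String),
      altSeg keys seg ws = (seg ++ (altSeg keys [] ws).1, (altSeg keys [] ws).2) := by
  intro ws
  induction ws with
  | nil => intro seg; simp [altSeg]
  | cons w ws ih =>
      intro seg
      by_cases h : w ∈ keys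
      · rw [altSeg_cons, altSeg_cons, if_pos h, if_pos h]; simp
      · rw [altSeg_cons, altSeg_cons, if_neg h, if_neg h, ih (seg ++ [w]), ih ([] ++ [w])]
        simp

-- main invariant: once A's loop holds a (nonempty) key, it equals B's block loop after
-- inserting that key with the stripped accumulated segment
theorem loop_main (st_claves : List String) :
    ∀ (ws : List String), ("" ∈ st_claves → "" ∉ ws) →
      ∀ (d : PySem.Dict String String) (key dato : String), key ≠ "" →
      pyLoopA st_claves ws d key dato =
        altBlocks (PySem.Set.ofList st_claves)
          (altSeg (PySem.Set.ofList st_claves) [] ws).2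
          (d.insert key (PySem.Str.strip
            (acc dato (altSeg (PySem.Set.ofList st_claves) [] ws).1))) := by
  intro ws
  induction ws with
  | nil =>
      intro _ d key dato hk
      simp [pyLoopA, altSeg, altBlocks, acc, hk]
  | cons w ws ih =>
      intro h0 d key dato hk
      have h0' : "" ∈ st_claves → "" ∉ ws := fun hs hm => h0 hs (List.mem_cons_of_mem w hm)
      by_cases h : w ∈ st_claves
      · have hw : w ≠ "" := ne_empty_of_mem st_claves ws w h0 h
        have hset : w ∈ PySem.Set.ofList st_claves := (PySem.Set.mem_ofList st_claves w).mpr h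
        rw [pyLoopA_cons, if_pos h, if_pos hk, ih h0' (d.insert key (PySem.Str.strip dato)) w "" hw,
          altSeg_cons, if_pos hset, altBlocks_cons, strip_acc_eq_strip_join]
        simp [acc]
      · have hset : w ∉ PySem.Set.ofList st_claves := fun hc =>
          h ((PySem.Set.mem_ofList st_claves w).mp hc)
        rw [pyLoopA_cons, if_neg h, ih h0' d key (dato ++ " " ++ w) hk, altSeg_cons, if_neg hset,
          altSeg_shift (PySem.Set.ofList st_claves) ws ([] ++ [w])]
        simp [acc]

-- A's loop with the initial falsy key equals B's skip-then-blocks loop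
theorem loop_skip (st_claves : List String) :
    ∀ (ws : List String), ("" ∈ st_claves → "" ∉ ws) →
      ∀ (d : PySem.Dict String String) (dato : String),
      pyLoopA st_claves ws d "" dato =
        altBlocks (PySem.Set.ofList st_claves)
          (altSkip (PySem.Set.ofList st_claves) ws) d := by
  intro ws
  induction ws with
  | nil => intro _ d dato; simp [pyLoopA, altSkip, altBlocks]
  | cons w ws ih =>
      intro h0 d dato
      have h0' : "" ∈ st_claves → "" ∉ ws := fun hs hm => h0 hs (List.mem_cons_of_mem w hm)
      by_cases h : w ∈ st_claves
      · have hw : w ≠ "" := ne_empty_of_mem st_claves ws w h0 h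
        have hset : w ∈ PySem.Set.ofList st_claves := (PySem.Set.mem_ofList st_claves w).mpr h
        rw [pyLoopA_cons, if_pos h, if_neg (by simp), loop_main st_claves ws h0' d w "" hw,
          altSkip_cons, if_pos hset, altBlocks_cons, strip_acc_eq_strip_join]
      · have hset : w ∉ PySem.Set.ofList st_claves := fun hc =>
          h ((PySem.Set.mem_ofList st_claves w).mp hc)
        rw [pyLoopA_cons, if_neg h, ih h0' d (dato ++ " " ++ w), altSkip_cons, if_neg hset]

-- ===== VERDICT (by name: the statement is the Claim_ definition above) =====
theorem check_claves_spec : Claim_equal_check_claves := by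
  intro mensaje st_claves _ hpre
  unfold Spec_check_claves check_claves check_claves_alt
  rw [loop_skip st_claves ((PySem.Str.split? mensaje " ").getD [])
    (fun hs hm => hpre ⟨hs, hm⟩)]
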